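-- pv_equiv track=rewrite | github.com/iiijam/python123answers | 第八周/反素数.py | getAntiPrime
-- ===== SOURCE A (Python) =====
-- def _isNotPalindrome(num):
--     return str(num) != str(num)[::-1]
--
-- def _isPrime(num):
--     if num < 2:
--         return False
--     for i in range(2,num):
--         if num % i == 0:
--             return False
--     return True
--
-- def getAntiPrime(n):
--     i = 0
--     result = []
--     num = 0
--     while i < n:
--         numInverse = int(str(num)[::-1])
--         if _isNotPalindrome(num) and _isPrime(num) and _isPrime(numInverse):
--             result.append(num)
--             i += 1
--         num += 1
--     return result
-- ===== SOURCE B (Python) =====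
-- def _isPrimeFast(m):
--     # divisor test bounded by sqrt(m) instead of scanning all of [2, m)
--     if m < 2:
--         return False
--     d = 2
--     while d * d <= m:
--         if m % d == 0:
--             return False
--         d += 1
--     return True
--
-- def _nextAnti(num):
--     # smallest anti-prime >= num
--     while True:
--         s = str(num)
--         r = s[::-1]
--         if s != r and _isPrimeFast(num) and _isPrimeFast(int(r)):
--             return num
--         num += 1
--
-- def getAntiPrime(n):
--     result = []
--     num = 0
--     while len(result) < n:
--         num = _nextAnti(num)
--         result.append(num)
--         num += 1
--     return result
-- ===== Notes on version B (the rewrite author's own statement) =====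
-- stated objective: faster
-- what changed: A's full-range trial division (every i in [2, m) for each candidate and its reverse) is replaced by a sqrt-bounded divisor test (while d*d <= m), and the single counting while-loop is decomposed into a next-anti-prime search helper called once per collected element.
import Mathlib
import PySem

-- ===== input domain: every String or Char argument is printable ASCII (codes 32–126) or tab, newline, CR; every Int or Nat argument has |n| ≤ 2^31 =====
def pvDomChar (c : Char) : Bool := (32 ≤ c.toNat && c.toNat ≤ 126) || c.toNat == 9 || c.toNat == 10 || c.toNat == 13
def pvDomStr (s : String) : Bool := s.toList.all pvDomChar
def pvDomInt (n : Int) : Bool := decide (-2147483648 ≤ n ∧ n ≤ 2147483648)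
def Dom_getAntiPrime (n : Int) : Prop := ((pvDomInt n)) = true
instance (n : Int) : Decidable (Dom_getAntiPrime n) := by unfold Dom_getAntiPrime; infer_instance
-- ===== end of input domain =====

-- B replaces A's full-range trial division by a sqrt-bounded divisor test inside a
-- next-anti-prime search helper called once per collected element (faster per test).
-- Both unbounded Python while-loops are ported with the same finite fuel (10^9 candidates).

-- s[::-1]  (a full slice with step -1 never raises, so .getD "" is never taken)
def pyStrRev (s : String) : String := (PySem.Str.slice? s none none (-1)).getD ""

-- ===== PORT A =====
def pyIsNotPalindrome (num : Int) : Bool :=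
  decide (PySem.Int.toStr num ≠ pyStrRev (PySem.Int.toStr num))

def pyIsPrime (num : Int) : Bool :=
  if num < 2 then false
  else (PySem.List.pyRange 2 num 1).all (fun i => !(PySem.Int.mod num i == 0))

-- A's while-loop, one fuel unit per examined candidate num
def getAntiPrimeLoop (n : Int) (i : Int) (result : List Int) (num : Int) : Nat → List Int
  | 0 => result
  | fuel+1 =>
    if i < n then
      -- int(str(num)[::-1]); num ≥ 0 here so the parse always succeeds
      if pyIsNotPalindrome num && pyIsPrime num &&
          pyIsPrime ((PySem.Int.ofStr? (pyStrRev (PySem.Int.toStr num))).getD 0) then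
        getAntiPrimeLoop n (i+1) (result ++ [num]) (num+1) fuel
      else
        getAntiPrimeLoop n i result (num+1) fuel
    else result

def getAntiPrime (n : Int) : List Int := getAntiPrimeLoop n 0 [] 0 1000000000

-- ===== PORT B =====
-- 'd = 2; while d*d <= m: …' of _isPrimeFast; terminates because d*d ≤ m forces d ≤ m
def pyIsPrimeFastLoop (m d : Int) : Bool :=
  if d * d ≤ m then
    if PySem.Int.mod m d == 0 then false
    else pyIsPrimeFastLoop m (d + 1)
  else true
termination_by (m + 1 - d).toNat
decreasing_by
  have hdm : d ≤ m := by
    by_cases h0 : d ≤ 0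
    · nlinarith
    · rw [not_le] at h0; nlinarith
  omega

def pyIsPrimeFast (m : Int) : Bool :=
  if m < 2 then false else pyIsPrimeFastLoop m 2

-- _nextAnti: the 'while True' search, one fuel unit per examined candidate;
-- returns the anti-prime found together with the remaining fuel
def nextAnti : Int → Nat → Option (Int × Nat)
  | _, 0 => none
  | num, fuel+1 =>
    if decide (PySem.Int.toStr num ≠ pyStrRev (PySem.Int.toStr num)) && pyIsPrimeFast num &&
        pyIsPrimeFast ((PySem.Int.ofStr? (pyStrRev (PySem.Int.toStr num))).getD 0) then
      some (num, fuel)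
    else nextAnti (num+1) fuel

-- the port of buildLoop cites this for termination
lemma nextAnti_lt : ∀ (fuel : Nat) (num m : Int) (f : Nat),
    nextAnti num fuel = some (m, f) → f < fuel := by
  intro fuel
  induction fuel with
  | zero => intro num m f h; simp [nextAnti] at h
  | succ g ih =>
    intro num m f h
    simp only [nextAnti] at h
    split at h
    · cases h; omega
    · exact Nat.lt_trans (ih (num+1) m f h) (Nat.lt_succ_self g)

-- 'while len(result) < n: num = _nextAnti(num); result.append(num); num += 1'
def buildLoop (n : Int) (result : List Int) (num : Int) (fuel : Nat) : List Int :=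
  if (result.length : Int) < n then
    match hn : nextAnti num fuel with
    | none => result
    | some (m, f) => buildLoop n (result ++ [m]) (m + 1) f
  else result
termination_by fuel
decreasing_by exact nextAnti_lt _ _ _ _ hn

def getAntiPrime_alt (n : Int) : List Int := buildLoop n [] 0 1000000000

-- ===== PRECONDITION & SPEC =====
def Spec_getAntiPrime (n : Int) (out : List Int) : Prop := out = getAntiPrime_alt n
instance (n : Int) (out : List Int) : Decidable (Spec_getAntiPrime n out) := by unfold Spec_getAntiPrime; infer_instance

-- ===== CLAIM (what is proved, stated in full; the proofs are below) =====
def Claim_equal_getAntiPrime : Prop := ∀ (n : Int), Dom_getAntiPrime n → Spec_getAntiPrime n (getAntiPrime n)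

-- ===== LEMMAS AND PROOFS =====

-- the candidate stream [num, num+1, …, num+fuel-1] that both while-loops walk
def pvScan : Int → Nat → List Int
  | _, 0 => []
  | num, fuel+1 => num :: pvScan (num+1) fuel

-- A's acceptance test on one candidate
def pvPA (num : Int) : Bool :=
  pyIsNotPalindrome num && pyIsPrime num &&
    pyIsPrime ((PySem.Int.ofStr? (pyStrRev (PySem.Int.toStr num))).getD 0)

-- B's acceptance test on one candidate
def pvPB (num : Int) : Bool :=
  decide (PySem.Int.toStr num ≠ pyStrRev (PySem.Int.toStr num)) && pyIsPrimeFast num &&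
    pyIsPrimeFast ((PySem.Int.ofStr? (pyStrRev (PySem.Int.toStr num))).getD 0)

lemma pvSqLe (e m : Int) (h : e * e ≤ m) : e ≤ m := by
  by_cases h0 : e ≤ 0
  · nlinarith
  · rw [not_le] at h0; nlinarith

lemma primeLoopB_iff : ∀ (k : Nat) (m d : Int), (m + 1 - d).toNat ≤ k → 2 ≤ d →
    (pyIsPrimeFastLoop m d = true ↔ ∀ e : Int, d ≤ e → e * e ≤ m → ¬ (e ∣ m)) := by
  intro k
  induction k with
  | zero =>
    intro m d hk hd
    have hdm : m < d := by omega
    rw [pyIsPrimeFastLoop, if_neg (by nlinarith)]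
    refine ⟨fun _ e he hsq _ => ?_, fun _ => rfl⟩
    have := pvSqLe e m hsq
    nlinarith
  | succ k ih =>
    intro m d hk hd
    rw [pyIsPrimeFastLoop]
    by_cases hsq : d * d ≤ m
    · rw [if_pos hsq]
      have hdm : d ≤ m := pvSqLe d m (by nlinarith)
      by_cases hmod : PySem.Int.mod m d = 0
      · rw [if_pos (show (PySem.Int.mod m d == 0) = true by simp [hmod])]
        refine ⟨fun hf => Bool.noConfusion hf, fun hAll => ?_⟩
        exact absurd ((PySem.Int.mod_eq_zero_iff_dvd m d).mp hmod) (hAll d le_rfl hsq)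
      · rw [if_neg (by simpa using hmod)]
        rw [ih m (d+1) (by omega) (by omega)]
        constructor
        · intro h e he hesq hdvd
          rcases eq_or_lt_of_le he with rfl | hlt
          · exact hmod ((PySem.Int.mod_eq_zero_iff_dvd m d).mpr hdvd)
          · exact h e (by omega) hesq hdvd
        · intro h e he hesq hdvd
          exact h e (by omega) hesq hdvd
    · rw [if_neg hsq]
      simp only [true_iff]
      intro e he hesq hdvd
      have : d * d ≤ e * e := by nlinarith
      nlinarith

lemma pyIsPrime_eq_fast (m : Int) : pyIsPrime m = pyIsPrimeFast m := by
  unfold pyIsPrime pyIsPrimeFast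
  by_cases h2 : m < 2
  · simp [h2]
  · rw [if_neg (by omega), if_neg (by omega)]
    have hB := primeLoopB_iff (m + 1 - 2).toNat m 2 le_rfl le_rfl
    have hA : ((PySem.List.pyRange 2 m 1).all (fun i => !(PySem.Int.mod m i == 0)) = true)
        ↔ ∀ i : Int, 2 ≤ i → i < m → ¬ (i ∣ m) := by
      rw [List.all_eq_true]
      constructor
      · intro h i h1 h2'
        have := h i ((PySem.List.mem_pyRange_one).mpr ⟨h1, h2'⟩)
        simp only [Bool.not_eq_eq_eq_not, Bool.not_true, beq_eq_false_iff_ne] at this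
        exact fun hd => this ((PySem.Int.mod_eq_zero_iff_dvd m i).mpr hd)
      · intro h i hi
        obtain ⟨h1, h2'⟩ := (PySem.List.mem_pyRange_one).mp hi
        simp only [Bool.not_eq_eq_eq_not, Bool.not_true, beq_eq_false_iff_ne]
        exact fun hm => h i h1 h2' ((PySem.Int.mod_eq_zero_iff_dvd m i).mp hm)
    have hbridge : (∀ i : Int, 2 ≤ i → i < m → ¬ (i ∣ m))
        ↔ ∀ e : Int, 2 ≤ e → e * e ≤ m → ¬ (e ∣ m) := by
      constructor
      · intro h e he hesq hdvd
        exact h e he (by nlinarith) hdvd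
      · intro h i h1 hlt hdvd
        obtain ⟨c, hc⟩ := hdvd
        have hi0 : 0 < i := by omega
        have hc1 : 1 ≤ c := by nlinarith
        have hc2 : 2 ≤ c := by
          rcases eq_or_lt_of_le hc1 with rfl | h'
          · omega
          · omega
        by_cases hii : i * i ≤ m
        · exact h i h1 hii ⟨c, hc⟩
        · rw [not_le] at hii
          have hci : c < i := by nlinarith
          exact h c hc2 (by nlinarith) ⟨i, by linarith [hc, mul_comm i c]⟩
    rw [Bool.eq_iff_iff, hA, hbridge, hB]

lemma pvPA_eq_pvPB (num : Int) : pvPA num = pvPB num := by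
  unfold pvPA pvPB pyIsNotPalindrome
  rw [pyIsPrime_eq_fast, pyIsPrime_eq_fast]

lemma pvLoopA_eq (fuel : Nat) : ∀ (n i : Int) (result : List Int) (num : Int),
    getAntiPrimeLoop n i result num fuel
      = result ++ ((pvScan num fuel).filter pvPA).take (n - i).toNat := by
  induction fuel with
  | zero => intro n i result num; simp [getAntiPrimeLoop, pvScan]
  | succ f ih =>
    intro n i result num
    by_cases h : i < n
    · by_cases hp : pvPA num = true
      · have : getAntiPrimeLoop n i result num (f+1)
            = getAntiPrimeLoop n (i+1) (result ++ [num]) (num+1) f := by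
          simp only [getAntiPrimeLoop, if_pos h]
          exact if_pos hp
        rw [this, ih]
        have ht : (n - i).toNat = (n - (i+1)).toNat + 1 := by omega
        simp [pvScan, hp, ht]
      · have : getAntiPrimeLoop n i result num (f+1)
            = getAntiPrimeLoop n i result (num+1) f := by
          simp only [getAntiPrimeLoop, if_pos h]
          exact if_neg hp
        rw [this, ih]
        simp [pvScan, hp]
    · have h0 : (n - i).toNat = 0 := by omega
      simp [getAntiPrimeLoop, h, h0]

lemma nextAnti_none : ∀ (fuel : Nat) (num : Int),
    nextAnti num fuel = none → (pvScan num fuel).filter pvPB = [] := by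
  intro fuel
  induction fuel with
  | zero => intro num _; simp [pvScan]
  | succ f ih =>
    intro num h
    simp only [nextAnti] at h
    rw [show (decide (PySem.Int.toStr num ≠ pyStrRev (PySem.Int.toStr num)) && pyIsPrimeFast num &&
        pyIsPrimeFast ((PySem.Int.ofStr? (pyStrRev (PySem.Int.toStr num))).getD 0)) = pvPB num from rfl] at h
    by_cases hp : pvPB num = true
    · rw [if_pos hp] at h; cases h
    · rw [if_neg hp] at h
      simp [pvScan, hp, ih (num+1) h]

lemma nextAnti_some : ∀ (fuel : Nat) (num m : Int) (f : Nat),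
    nextAnti num fuel = some (m, f) →
      (pvScan num fuel).filter pvPB = m :: (pvScan (m+1) f).filter pvPB := by
  intro fuel
  induction fuel with
  | zero => intro num m f h; simp [nextAnti] at h
  | succ g ih =>
    intro num m f h
    simp only [nextAnti] at h
    rw [show (decide (PySem.Int.toStr num ≠ pyStrRev (PySem.Int.toStr num)) && pyIsPrimeFast num &&
        pyIsPrimeFast ((PySem.Int.ofStr? (pyStrRev (PySem.Int.toStr num))).getD 0)) = pvPB num from rfl] at h
    by_cases hp : pvPB num = true
    · rw [if_pos hp] at h
      cases h
      simp [pvScan, hp]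
    · rw [if_neg hp] at h
      simp [pvScan, hp, ih (num+1) m f h]

lemma buildLoop_eq (n : Int) : ∀ (fuel : Nat) (result : List Int) (num : Int),
    buildLoop n result num fuel
      = result ++ ((pvScan num fuel).filter pvPB).take (n - result.length).toNat := by
  intro fuel
  induction fuel using Nat.strong_induction_on with
  | _ fuel ih =>
    intro result num
    by_cases h : (result.length : Int) < n
    · rw [buildLoop, if_pos h]
      split
      · next hn => rw [nextAnti_none fuel num hn]; simp
      · next m f hn =>
        rw [nextAnti_some fuel num m f hn]
        rw [ih f (nextAnti_lt fuel num m f hn) (result ++ [m]) (m+1)]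
        have ht : (n - (result.length : Int)).toNat
            = (n - ((result ++ [m]).length : Int)).toNat + 1 := by
          simp only [List.length_append, List.length_cons, List.length_nil]
          omega
        rw [ht]
        simp
    · rw [buildLoop, if_neg h]
      have h0 : (n - (result.length : Int)).toNat = 0 := by omega
      simp [h0]

-- ===== VERDICT (by name: the statement is the Claim_ definition above) =====
theorem getAntiPrime_spec : Claim_equal_getAntiPrime := by
  intro n _
  unfold Spec_getAntiPrime getAntiPrime getAntiPrime_alt
  rw [pvLoopA_eq, buildLoop_eq]
  simp only [List.nil_append, List.length_nil, Int.natCast_zero, Int.sub_zero]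
  rw [List.filter_congr (fun x _ => pvPA_eq_pvPB x)]
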